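-- pv_equiv track=rewrite | github.com/phamngocsonls/enhanced-smart-k8s-autoscaler | src/cost_allocation.py | extract_cost_tags
-- ===== SOURCE A (Python) =====
-- from typing import Dict, List, Optional, Tuple
--
-- def extract_cost_tags(labels: Dict[str, str]) -> Dict[str, str]:
--     """Extract cost allocation tags from labels"""
--     tags = {}
--
--     # Common label patterns for cost allocation
--     tag_mappings = {
--         'team': ['team', 'owner', 'squad'],
--         'project': ['project', 'app', 'application'],
--         'environment': ['env', 'environment', 'stage'],
--         'cost_center': ['cost-center', 'costcenter', 'billing'],
--         'department': ['department', 'dept', 'division']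
--     }
--
--     for tag_name, possible_keys in tag_mappings.items():
--         for key in possible_keys:
--             if key in labels:
--                 tags[tag_name] = labels[key]
--                 break
--
--     return tags
-- ===== SOURCE B (Python) =====
-- # B: reverse-index + single pass over labels keeping the minimum-rank hit per tag
-- # (alternative decomposition; same results as the nested scan-and-break).
-- TAG_MAPPINGS = {
--     'team': ['team', 'owner', 'squad'],
--     'project': ['project', 'app', 'application'],
--     'environment': ['env', 'environment', 'stage'],
--     'cost_center': ['cost-center', 'costcenter', 'billing'],
--     'department': ['department', 'dept', 'division'],
-- }
--
-- _REV_INDEX = {key: (tag, rank)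
--               for tag, keys in TAG_MAPPINGS.items()
--               for rank, key in enumerate(keys)}
--
--
-- def extract_cost_tags(labels):
--     """Extract cost allocation tags from labels"""
--     best = {}
--     for key, value in labels.items():
--         hit = _REV_INDEX.get(key)
--         if hit is None:
--             continue
--         tag, rank = hit
--         cur = best.get(tag)
--         if cur is None or rank < cur[0]:
--             best[tag] = (rank, value)
--     return {tag: best[tag][1] for tag in TAG_MAPPINGS if tag in best}
-- ===== Notes on version B (the rewrite author's own statement) =====
-- stated objective: alternative
-- what changed: Replaces the nested scan-and-break over the fixed tag mappings with a prebuilt reverse index (label key -> (tag, priority rank)) and a single pass over the labels that keeps the minimum-rank value per tag, emitting tags in the fixed mapping order.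
import Mathlib
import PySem

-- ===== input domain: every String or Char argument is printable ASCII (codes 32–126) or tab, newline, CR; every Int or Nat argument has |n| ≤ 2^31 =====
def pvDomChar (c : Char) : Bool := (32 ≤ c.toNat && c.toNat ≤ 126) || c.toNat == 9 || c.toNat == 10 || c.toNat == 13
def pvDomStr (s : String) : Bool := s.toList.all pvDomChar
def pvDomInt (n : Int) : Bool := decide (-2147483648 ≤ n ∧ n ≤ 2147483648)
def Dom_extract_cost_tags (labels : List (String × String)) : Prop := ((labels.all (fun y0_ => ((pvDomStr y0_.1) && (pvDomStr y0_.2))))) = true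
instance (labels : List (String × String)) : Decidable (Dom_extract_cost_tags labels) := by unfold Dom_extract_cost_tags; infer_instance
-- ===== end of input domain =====

-- B replaces A's nested scan-and-break with a reverse index and one pass over the labels; alternative decomposition, same values.

-- ===== PORT A =====
def tagMappings : List (String × List String) :=
  [("team", ["team", "owner", "squad"]),
   ("project", ["project", "app", "application"]),
   ("environment", ["env", "environment", "stage"]),
   ("cost_center", ["cost-center", "costcenter", "billing"]),
   ("department", ["department", "dept", "division"])]

-- inner 'for key in possible_keys: if key in labels: tags[tag_name] = labels[key]; break'
def tryKeys (labelsD : PySem.Dict String String) (tags : PySem.Dict String String)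
    (tag : String) : List String → PySem.Dict String String
  | [] => tags
  | k :: rest =>
    match labelsD.get? k with
    | some v => tags.insert tag v
    | none => tryKeys labelsD tags tag rest

def extract_cost_tags (labels : List (String × String)) : List (String × String) :=
  (tagMappings.foldl
    (fun tags p => tryKeys (PySem.Dict.mk labels) tags p.1 p.2)
    PySem.Dict.empty).items

-- ===== PORT B =====
-- _REV_INDEX = {key: (tag, rank) for tag, keys in TAG_MAPPINGS.items() for rank, key in enumerate(keys)}
def revIndex : PySem.Dict String (String × Int) :=
  PySem.Dict.ofList
    (tagMappings.flatMap (fun p => (PySem.List.enumerate p.2).map (fun q => (q.2, (p.1, q.1)))))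

def bestStep (best : PySem.Dict String (Int × String)) (p : String × String) :
    PySem.Dict String (Int × String) :=
  match revIndex.get? p.1 with
  | none => best
  | some (tag, rank) =>
    match best.get? tag with
    | none => best.insert tag (rank, p.2)
    | some cur => if rank < cur.1 then best.insert tag (rank, p.2) else best

def extract_cost_tags_alt (labels : List (String × String)) : List (String × String) :=
  let best := labels.foldl bestStep PySem.Dict.empty
  (tagMappings.foldl
    (fun acc p =>
      match best.get? p.1 with
      | some rv => acc.insert p.1 rv.2
      | none => acc)
    PySem.Dict.empty).items

-- ===== PRECONDITION & SPEC =====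
def Spec_extract_cost_tags (labels : List (String × String)) (out : List (String × String)) : Prop := out = extract_cost_tags_alt labels
instance (labels : List (String × String)) (out : List (String × String)) : Decidable (Spec_extract_cost_tags labels out) := by unfold Spec_extract_cost_tags; infer_instance

-- ===== CLAIM (what is proved, stated in full; the proofs are below) =====
def Claim_equal_extract_cost_tags : Prop := ∀ (labels : List (String × String)), Dom_extract_cost_tags labels → Spec_extract_cost_tags labels (extract_cost_tags labels)

-- ===== LEMMAS AND PROOFS =====

-- proof-side spec: index of k in ks, as an Int
def idxOfI : List String → String → Option Int
  | [], _ => none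
  | k' :: rest, k => if k' = k then some 0 else (idxOfI rest k).map (· + 1)

-- proof-side spec: 'keep the smaller rank, first occurrence wins on ties'
def push (o : Option (Int × String)) (j : Int) (v : String) : Option (Int × String) :=
  match o with
  | none => some (j, v)
  | some (r, w) => if j < r then some (j, v) else some (r, w)

-- proof-side spec: minimum-rank hit of ks over the labels, first occurrence's value on ties
def minHit (ks : List String) : List (String × String) → Option (Int × String)
  | [] => none
  | (k, v) :: rest =>
    match idxOfI ks k with
    | some j =>
      match minHit ks rest with
      | none => some (j, v)
      | some (r, w) => if j ≤ r then some (j, v) else some (r, w)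
    | none => minHit ks rest

def combine (o m : Option (Int × String)) : Option (Int × String) :=
  match o, m with
  | none, m => m
  | some p, none => some p
  | some (r, w), some (r', w') => if r' < r then some (r', w') else some (r, w)

-- the effect of one bestStep on the entry of tag t
def G (t : String) (o : Option (Int × String)) (p : String × String) : Option (Int × String) :=
  match revIndex.get? p.1 with
  | none => o
  | some (t', j) => if t' = t then push o j p.2 else o

lemma revIndex_eq : revIndex = PySem.Dict.mk
    [("team", ("team", 0)), ("owner", ("team", 1)), ("squad", ("team", 2)),
     ("project", ("project", 0)), ("app", ("project", 1)), ("application", ("project", 2)),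
     ("env", ("environment", 0)), ("environment", ("environment", 1)), ("stage", ("environment", 2)),
     ("cost-center", ("cost_center", 0)), ("costcenter", ("cost_center", 1)), ("billing", ("cost_center", 2)),
     ("department", ("department", 0)), ("dept", ("department", 1)), ("division", ("department", 2))] := by
  rfl

lemma idxOfI_nonneg : ∀ (ks : List String) (k : String) (j : Int), idxOfI ks k = some j → 0 ≤ j := by
  intro ks
  induction ks with
  | nil => intro k j h; simp [idxOfI] at h
  | cons k' rest ih =>
    intro k j h
    simp only [idxOfI] at h
    by_cases hk : k' = k
    · simp [hk] at h; omega
    · simp only [if_neg hk] at h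
      rcases hr : idxOfI rest k with _ | j'
      · simp [hr] at h
      · simp [hr] at h
        have := ih k j' hr
        omega

lemma minHit_nonneg : ∀ (labels : List (String × String)) (ks : List String) (r : Int) (w : String),
    minHit ks labels = some (r, w) → 0 ≤ r := by
  intro labels
  induction labels with
  | nil => intro ks r w h; simp [minHit] at h
  | cons p rest ih =>
    intro ks r w h
    rcases p with ⟨k, v⟩
    simp only [minHit] at h
    rcases hi : idxOfI ks k with _ | j <;> simp only [hi] at h
    · exact ih ks r w h
    · have hj := idxOfI_nonneg ks k j hi
      rcases hm : minHit ks rest with _ | ⟨r', w'⟩ <;> simp only [hm] at h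
      · cases h; omega
      · have hr' := ih ks r' w' hm
        split_ifs at h <;> cases h <;> omega

lemma minHit_nil_keys : ∀ (labels : List (String × String)), minHit [] labels = none := by
  intro labels
  induction labels with
  | nil => rfl
  | cons p rest ih => rcases p with ⟨k, v⟩; simp [minHit, idxOfI, ih]

lemma minHit_cons_key (k : String) (ks : List String) :
    ∀ (labels : List (String × String)),
    minHit (k :: ks) labels =
      (match (PySem.Dict.mk labels).get? k with
       | some v => some (0, v)
       | none => (minHit ks labels).map (fun p => (p.1 + 1, p.2))) := by
  intro labels
  induction labels with
  | nil => rfl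
  | cons p rest ih =>
    rcases p with ⟨k0, v0⟩
    by_cases hk : k0 = k
    · subst hk
      simp only [minHit, idxOfI, PySem.Dict.get?_mk_cons, beq_self_eq_true, if_true, ih]
      rcases hr : (PySem.Dict.mk rest).get? k0 with _ | v
      · rcases hm : minHit ks rest with _ | ⟨r, w⟩
        · simp [hr, hm]
        · have := minHit_nonneg rest ks r w hm
          simp [hr, hm, show (0:Int) ≤ r + 1 by omega]
      · simp [hr]
    · have hk1 : (k0 == k) = false := by simp [hk]
      simp only [minHit, idxOfI, PySem.Dict.get?_mk_cons, hk1, Bool.false_eq_true,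
        if_false, if_neg (Ne.symm hk), ih]
      rcases hr : (PySem.Dict.mk rest).get? k with _ | v
      · rcases hi : idxOfI ks k0 with _ | j
        · simp [hr, hi]
        · have hj := idxOfI_nonneg ks k0 j hi
          rcases hm : minHit ks rest with _ | ⟨r, w⟩
          · simp [hr, hi, hm]
          · by_cases hle : j ≤ r
            · simp [hr, hi, hm, hle, show j + 1 ≤ r + 1 by omega]
            · simp [hr, hi, hm, hle, show ¬ (j + 1 ≤ r + 1) by omega]
      · rcases hi : idxOfI ks k0 with _ | j
        · simp [hr, hi]
        · have hj := idxOfI_nonneg ks k0 j hi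
          simp [hr, hi, show ¬ (j + 1 ≤ (0:Int)) by omega]

lemma tryKeys_eq (labels : List (String × String)) (tag : String) :
    ∀ (ks : List String) (tags : PySem.Dict String String),
    tryKeys (PySem.Dict.mk labels) tags tag ks =
      (match minHit ks labels with
       | some p => tags.insert tag p.2
       | none => tags) := by
  intro ks
  induction ks with
  | nil => intro tags; simp [tryKeys, minHit_nil_keys]
  | cons k rest ih =>
    intro tags
    simp only [tryKeys, minHit_cons_key]
    rcases hr : (PySem.Dict.mk labels).get? k with _ | v
    · simp only [ih]
      rcases hm : minHit rest labels with _ | ⟨r, w⟩ <;> simp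
    · simp

lemma bestStep_get (best : PySem.Dict String (Int × String)) (p : String × String) (t : String) :
    (bestStep best p).get? t = G t (best.get? t) p := by
  rcases hr : revIndex.get? p.1 with _ | ⟨t', j⟩
  · simp [bestStep, G, hr]
  · by_cases ht : t' = t
    · subst ht
      rcases hb : best.get? t' with _ | ⟨r, w⟩
      · simp [bestStep, G, hr, hb, push, PySem.Dict.get?_insert]
      · by_cases hlt : j < r
        · simp [bestStep, G, hr, hb, push, hlt, PySem.Dict.get?_insert]
        · simp [bestStep, G, hr, hb, push, hlt]
    · have hne : t ≠ t' := fun h => ht h.symm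
      rcases hb : best.get? t' with _ | ⟨r, w⟩
      · simp [bestStep, G, hr, hb, ht, PySem.Dict.get?_insert, hne]
      · by_cases hlt : j < r
        · simp [bestStep, G, hr, hb, ht, hlt, PySem.Dict.get?_insert, hne]
        · simp [bestStep, G, hr, hb, ht, hlt]

lemma fold_get (t : String) : ∀ (labels : List (String × String)) (best : PySem.Dict String (Int × String)),
    (labels.foldl bestStep best).get? t = labels.foldl (G t) (best.get? t) := by
  intro labels
  induction labels with
  | nil => intro best; rfl
  | cons p rest ih =>
    intro best
    simp only [List.foldl_cons, ih, bestStep_get]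

lemma push_combine (o : Option (Int × String)) (j : Int) (v : String) (m : Option (Int × String)) :
    combine (push o j v) m =
      combine o (match m with
                 | none => some (j, v)
                 | some (r, w) => if j ≤ r then some (j, v) else some (r, w)) := by
  rcases o with _ | ⟨p, q⟩ <;> rcases m with _ | ⟨r, w⟩
  · rfl
  · by_cases hjr : j ≤ r
    · simp [push, combine, hjr, show ¬ r < j by omega]
    · simp [push, combine, hjr, show r < j by omega]
  · by_cases hjp : j < p <;> simp [push, combine, hjp]
  · by_cases hjp : j < p <;> by_cases hjr : j ≤ r
    · simp [push, combine, hjp, hjr, show ¬ r < j by omega]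
    · simp [push, combine, hjp, hjr, show r < j by omega, show r < p by omega]
    · simp [push, combine, hjp, hjr, show ¬ r < p by omega]
    · simp [push, combine, hjp, hjr]

lemma foldG (t : String) (ks : List String)
    (hG : ∀ (o : Option (Int × String)) (k v : String),
      G t o (k, v) = (match idxOfI ks k with | some j => push o j v | none => o)) :
    ∀ (labels : List (String × String)) (o : Option (Int × String)),
    labels.foldl (G t) o = combine o (minHit ks labels) := by
  intro labels
  induction labels with
  | nil => intro o; rcases o with _ | p <;> rfl
  | cons p rest ih =>
    intro o
    rcases p with ⟨k, v⟩
    rw [List.foldl_cons, hG, ih]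
    rcases hi : idxOfI ks k with _ | j
    · simp [minHit, hi]
    · simp only [minHit, hi, push_combine]

-- the five per-tag step characterisations
lemma Gchar_team : ∀ (o : Option (Int × String)) (k v : String),
    G "team" o (k, v) = (match idxOfI ["team", "owner", "squad"] k with | some j => push o j v | none => o) := by
  intro o k v
  unfold G
  rw [revIndex_eq]
  simp only [PySem.Dict.get?_mk_cons, idxOfI]
  by_cases h1 : "team" = k
  · simp [← h1, push]
  by_cases h2 : "owner" = k
  · simp [← h2, h1, push]
  by_cases h3 : "squad" = k
  · simp [← h3, h1, h2, push]
  by_cases h4 : "project" = k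
  · simp [← h4, h1, h2, h3, push]
  by_cases h5 : "app" = k
  · simp [← h5, h1, h2, h3, h4, push]
  by_cases h6 : "application" = k
  · simp [← h6, h1, h2, h3, h4, h5, push]
  by_cases h7 : "env" = k
  · simp [← h7, h1, h2, h3, h4, h5, h6, push]
  by_cases h8 : "environment" = k
  · simp [← h8, h1, h2, h3, h4, h5, h6, h7, push]
  by_cases h9 : "stage" = k
  · simp [← h9, h1, h2, h3, h4, h5, h6, h7, h8, push]
  by_cases h10 : "cost-center" = k
  · simp [← h10, h1, h2, h3, h4, h5, h6, h7, h8, h9, push]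
  by_cases h11 : "costcenter" = k
  · simp [← h11, h1, h2, h3, h4, h5, h6, h7, h8, h9, h10, push]
  by_cases h12 : "billing" = k
  · simp [← h12, h1, h2, h3, h4, h5, h6, h7, h8, h9, h10, h11, push]
  by_cases h13 : "department" = k
  · simp [← h13, h1, h2, h3, h4, h5, h6, h7, h8, h9, h10, h11, h12, push]
  by_cases h14 : "dept" = k
  · simp [← h14, h1, h2, h3, h4, h5, h6, h7, h8, h9, h10, h11, h12, h13, push]
  by_cases h15 : "division" = k
  · simp [← h15, h1, h2, h3, h4, h5, h6, h7, h8, h9, h10, h11, h12, h13, h14, push]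
  simp [h1, h2, h3, h4, h5, h6, h7, h8, h9, h10, h11, h12, h13, h14, h15, PySem.Dict.get?]

lemma Gchar_project : ∀ (o : Option (Int × String)) (k v : String),
    G "project" o (k, v) = (match idxOfI ["project", "app", "application"] k with | some j => push o j v | none => o) := by
  intro o k v
  unfold G
  rw [revIndex_eq]
  simp only [PySem.Dict.get?_mk_cons, idxOfI]
  by_cases h1 : "team" = k
  · simp [← h1, push]
  by_cases h2 : "owner" = k
  · simp [← h2, h1, push]
  by_cases h3 : "squad" = k
  · simp [← h3, h1, h2, push]
  by_cases h4 : "project" = k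
  · simp [← h4, h1, h2, h3, push]
  by_cases h5 : "app" = k
  · simp [← h5, h1, h2, h3, h4, push]
  by_cases h6 : "application" = k
  · simp [← h6, h1, h2, h3, h4, h5, push]
  by_cases h7 : "env" = k
  · simp [← h7, h1, h2, h3, h4, h5, h6, push]
  by_cases h8 : "environment" = k
  · simp [← h8, h1, h2, h3, h4, h5, h6, h7, push]
  by_cases h9 : "stage" = k
  · simp [← h9, h1, h2, h3, h4, h5, h6, h7, h8, push]
  by_cases h10 : "cost-center" = k
  · simp [← h10, h1, h2, h3, h4, h5, h6, h7, h8, h9, push]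
  by_cases h11 : "costcenter" = k
  · simp [← h11, h1, h2, h3, h4, h5, h6, h7, h8, h9, h10, push]
  by_cases h12 : "billing" = k
  · simp [← h12, h1, h2, h3, h4, h5, h6, h7, h8, h9, h10, h11, push]
  by_cases h13 : "department" = k
  · simp [← h13, h1, h2, h3, h4, h5, h6, h7, h8, h9, h10, h11, h12, push]
  by_cases h14 : "dept" = k
  · simp [← h14, h1, h2, h3, h4, h5, h6, h7, h8, h9, h10, h11, h12, h13, push]
  by_cases h15 : "division" = k
  · simp [← h15, h1, h2, h3, h4, h5, h6, h7, h8, h9, h10, h11, h12, h13, h14, push]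
  simp [h1, h2, h3, h4, h5, h6, h7, h8, h9, h10, h11, h12, h13, h14, h15, PySem.Dict.get?]

lemma Gchar_environment : ∀ (o : Option (Int × String)) (k v : String),
    G "environment" o (k, v) = (match idxOfI ["env", "environment", "stage"] k with | some j => push o j v | none => o) := by
  intro o k v
  unfold G
  rw [revIndex_eq]
  simp only [PySem.Dict.get?_mk_cons, idxOfI]
  by_cases h1 : "team" = k
  · simp [← h1, push]
  by_cases h2 : "owner" = k
  · simp [← h2, h1, push]
  by_cases h3 : "squad" = k
  · simp [← h3, h1, h2, push]
  by_cases h4 : "project" = k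
  · simp [← h4, h1, h2, h3, push]
  by_cases h5 : "app" = k
  · simp [← h5, h1, h2, h3, h4, push]
  by_cases h6 : "application" = k
  · simp [← h6, h1, h2, h3, h4, h5, push]
  by_cases h7 : "env" = k
  · simp [← h7, h1, h2, h3, h4, h5, h6, push]
  by_cases h8 : "environment" = k
  · simp [← h8, h1, h2, h3, h4, h5, h6, h7, push]
  by_cases h9 : "stage" = k
  · simp [← h9, h1, h2, h3, h4, h5, h6, h7, h8, push]
  by_cases h10 : "cost-center" = k
  · simp [← h10, h1, h2, h3, h4, h5, h6, h7, h8, h9, push]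
  by_cases h11 : "costcenter" = k
  · simp [← h11, h1, h2, h3, h4, h5, h6, h7, h8, h9, h10, push]
  by_cases h12 : "billing" = k
  · simp [← h12, h1, h2, h3, h4, h5, h6, h7, h8, h9, h10, h11, push]
  by_cases h13 : "department" = k
  · simp [← h13, h1, h2, h3, h4, h5, h6, h7, h8, h9, h10, h11, h12, push]
  by_cases h14 : "dept" = k
  · simp [← h14, h1, h2, h3, h4, h5, h6, h7, h8, h9, h10, h11, h12, h13, push]
  by_cases h15 : "division" = k
  · simp [← h15, h1, h2, h3, h4, h5, h6, h7, h8, h9, h10, h11, h12, h13, h14, push]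
  simp [h1, h2, h3, h4, h5, h6, h7, h8, h9, h10, h11, h12, h13, h14, h15, PySem.Dict.get?]

lemma Gchar_cost_center : ∀ (o : Option (Int × String)) (k v : String),
    G "cost_center" o (k, v) = (match idxOfI ["cost-center", "costcenter", "billing"] k with | some j => push o j v | none => o) := by
  intro o k v
  unfold G
  rw [revIndex_eq]
  simp only [PySem.Dict.get?_mk_cons, idxOfI]
  by_cases h1 : "team" = k
  · simp [← h1, push]
  by_cases h2 : "owner" = k
  · simp [← h2, h1, push]
  by_cases h3 : "squad" = k
  · simp [← h3, h1, h2, push]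
  by_cases h4 : "project" = k
  · simp [← h4, h1, h2, h3, push]
  by_cases h5 : "app" = k
  · simp [← h5, h1, h2, h3, h4, push]
  by_cases h6 : "application" = k
  · simp [← h6, h1, h2, h3, h4, h5, push]
  by_cases h7 : "env" = k
  · simp [← h7, h1, h2, h3, h4, h5, h6, push]
  by_cases h8 : "environment" = k
  · simp [← h8, h1, h2, h3, h4, h5, h6, h7, push]
  by_cases h9 : "stage" = k
  · simp [← h9, h1, h2, h3, h4, h5, h6, h7, h8, push]
  by_cases h10 : "cost-center" = k
  · simp [← h10, h1, h2, h3, h4, h5, h6, h7, h8, h9, push]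
  by_cases h11 : "costcenter" = k
  · simp [← h11, h1, h2, h3, h4, h5, h6, h7, h8, h9, h10, push]
  by_cases h12 : "billing" = k
  · simp [← h12, h1, h2, h3, h4, h5, h6, h7, h8, h9, h10, h11, push]
  by_cases h13 : "department" = k
  · simp [← h13, h1, h2, h3, h4, h5, h6, h7, h8, h9, h10, h11, h12, push]
  by_cases h14 : "dept" = k
  · simp [← h14, h1, h2, h3, h4, h5, h6, h7, h8, h9, h10, h11, h12, h13, push]
  by_cases h15 : "division" = k
  · simp [← h15, h1, h2, h3, h4, h5, h6, h7, h8, h9, h10, h11, h12, h13, h14, push]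
  simp [h1, h2, h3, h4, h5, h6, h7, h8, h9, h10, h11, h12, h13, h14, h15, PySem.Dict.get?]

lemma Gchar_department : ∀ (o : Option (Int × String)) (k v : String),
    G "department" o (k, v) = (match idxOfI ["department", "dept", "division"] k with | some j => push o j v | none => o) := by
  intro o k v
  unfold G
  rw [revIndex_eq]
  simp only [PySem.Dict.get?_mk_cons, idxOfI]
  by_cases h1 : "team" = k
  · simp [← h1, push]
  by_cases h2 : "owner" = k
  · simp [← h2, h1, push]
  by_cases h3 : "squad" = k
  · simp [← h3, h1, h2, push]
  by_cases h4 : "project" = k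
  · simp [← h4, h1, h2, h3, push]
  by_cases h5 : "app" = k
  · simp [← h5, h1, h2, h3, h4, push]
  by_cases h6 : "application" = k
  · simp [← h6, h1, h2, h3, h4, h5, push]
  by_cases h7 : "env" = k
  · simp [← h7, h1, h2, h3, h4, h5, h6, push]
  by_cases h8 : "environment" = k
  · simp [← h8, h1, h2, h3, h4, h5, h6, h7, push]
  by_cases h9 : "stage" = k
  · simp [← h9, h1, h2, h3, h4, h5, h6, h7, h8, push]
  by_cases h10 : "cost-center" = k
  · simp [← h10, h1, h2, h3, h4, h5, h6, h7, h8, h9, push]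
  by_cases h11 : "costcenter" = k
  · simp [← h11, h1, h2, h3, h4, h5, h6, h7, h8, h9, h10, push]
  by_cases h12 : "billing" = k
  · simp [← h12, h1, h2, h3, h4, h5, h6, h7, h8, h9, h10, h11, push]
  by_cases h13 : "department" = k
  · simp [← h13, h1, h2, h3, h4, h5, h6, h7, h8, h9, h10, h11, h12, push]
  by_cases h14 : "dept" = k
  · simp [← h14, h1, h2, h3, h4, h5, h6, h7, h8, h9, h10, h11, h12, h13, push]
  by_cases h15 : "division" = k
  · simp [← h15, h1, h2, h3, h4, h5, h6, h7, h8, h9, h10, h11, h12, h13, h14, push]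
  simp [h1, h2, h3, h4, h5, h6, h7, h8, h9, h10, h11, h12, h13, h14, h15, PySem.Dict.get?]

lemma best_get (labels : List (String × String)) (t : String) (ks : List String)
    (hG : ∀ (o : Option (Int × String)) (k v : String),
      G t o (k, v) = (match idxOfI ks k with | some j => push o j v | none => o)) :
    (labels.foldl bestStep PySem.Dict.empty).get? t = minHit ks labels := by
  rw [fold_get, show (PySem.Dict.empty : PySem.Dict String (Int × String)).get? t = none from rfl,
      foldG t ks hG]
  rcases minHit ks labels with _ | p <;> rfl

-- ===== VERDICT (by name: the statement is the Claim_ definition above) =====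
theorem extract_cost_tags_spec : Claim_equal_extract_cost_tags := by
  intro labels _
  unfold Spec_extract_cost_tags extract_cost_tags extract_cost_tags_alt
  simp only [tagMappings, List.foldl_cons, List.foldl_nil]
  rw [tryKeys_eq, tryKeys_eq, tryKeys_eq, tryKeys_eq, tryKeys_eq,
      best_get labels "team" _ Gchar_team,
      best_get labels "project" _ Gchar_project,
      best_get labels "environment" _ Gchar_environment,
      best_get labels "cost_center" _ Gchar_cost_center,
      best_get labels "department" _ Gchar_department]
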